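-- pv_equiv track=rewrite | github.com/SKYJ0/GOL_EVENTS_PROV2.1 | legacy_python/encrypt.py | rolling_xor_encrypt
-- ===== SOURCE A (Python) =====
-- def rolling_xor_encrypt(text, key_bytes):
--     encrypted = []
--     text_bytes = text.encode('utf-8')
--     key_len = len(key_bytes)
--
--     for i in range(len(text_bytes)):
--         # XOR the character with the corresponding key byte (rolling)
--         encrypted_byte = text_bytes[i] ^ key_bytes[i % key_len]
--         # Additional mix: XOR with the previous encrypted byte (CBC-like) to diffuse patterns
--         if i > 0:
--             encrypted_byte ^= encrypted[i-1]
--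
--         encrypted.append(encrypted_byte)
--
--     return bytes(encrypted).hex().upper()
-- ===== SOURCE B (Python) =====
-- def rolling_xor_encrypt(text, key_bytes):
--     # Two-phase: mask the text bytes with the cycled key, then a prefix-XOR
--     # scan turns the masked stream into the CBC-like chained ciphertext.
--     data = text.encode('utf-8')
--     klen = len(key_bytes)
--     masked = [b ^ key_bytes[i % klen] for i, b in enumerate(data)]
--     out = []
--     acc = 0
--     for m in masked:
--         acc ^= m
--         out.append(acc)
--     return bytes(out).hex().upper()
-- ===== Notes on version B (the rewrite author's own statement) =====
-- stated objective: alternative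
-- what changed: A's single indexed loop with the 'if i>0: xor previous ciphertext byte' backreference is replaced by a two-phase decomposition: a key-masking pass over enumerate(data) followed by a branch-free prefix-XOR scan; Pre_ excludes exactly the inputs where A raises (empty key with non-empty text -> ZeroDivisionError; a used key byte outside 0..255 -> ValueError in bytes()).
import Mathlib
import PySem

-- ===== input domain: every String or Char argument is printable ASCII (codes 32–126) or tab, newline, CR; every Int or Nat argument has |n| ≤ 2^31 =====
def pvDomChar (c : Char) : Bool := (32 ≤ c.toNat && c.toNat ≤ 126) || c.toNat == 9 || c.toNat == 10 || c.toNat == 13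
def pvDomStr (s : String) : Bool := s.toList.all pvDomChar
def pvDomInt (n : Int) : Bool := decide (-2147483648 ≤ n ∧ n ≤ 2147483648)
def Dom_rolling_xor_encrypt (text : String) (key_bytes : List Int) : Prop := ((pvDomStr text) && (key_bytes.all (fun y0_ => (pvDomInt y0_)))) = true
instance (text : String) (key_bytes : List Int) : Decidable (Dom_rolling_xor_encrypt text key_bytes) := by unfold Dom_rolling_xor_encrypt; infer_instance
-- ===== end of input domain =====

-- B changes the decomposition (mask pass + branch-free prefix-XOR scan instead of one
-- indexed loop reading the previous ciphertext byte); same O(n) cost.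

-- shared tail of both Pythons: 'bytes(lst).hex().upper()' (exact for bytes in 0..255, which Pre_ guarantees)
def pvHexDigit (k : Nat) : Char := if k < 10 then Char.ofNat (48 + k) else Char.ofNat (87 + k)
def pvBytesHexUpper (bs : List Int) : String :=
  PySem.Str.upper (String.ofList (bs.flatMap (fun b => [pvHexDigit (b.toNat / 16), pvHexDigit (b.toNat % 16)])))

-- ===== PORT A =====
def rolling_xor_encrypt (text : String) (key_bytes : List Int) : String :=
  let text_bytes : List Int := text.toList.map (fun c => (c.toNat : Int))
  let key_len := key_bytes.length
  let encrypted := (List.range text_bytes.length).foldl (fun (encrypted : List Int) i =>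
    let encrypted_byte := PySem.Int.bxor (text_bytes.getD i 0) (key_bytes.getD (i % key_len) 0)
    let encrypted_byte := if 0 < i then PySem.Int.bxor encrypted_byte (encrypted.getD (i - 1) 0) else encrypted_byte
    encrypted ++ [encrypted_byte]) []
  pvBytesHexUpper encrypted

-- ===== PORT B =====
def rolling_xor_encrypt_alt (text : String) (key_bytes : List Int) : String :=
  let data : List Int := text.toList.map (fun c => (c.toNat : Int))
  let klen := key_bytes.length
  let masked := (PySem.List.enumerate data).map (fun p => PySem.Int.bxor p.2 (key_bytes.getD (p.1.toNat % klen) 0))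
  let out := (masked.foldl (fun (p : List Int × Int) m =>
      let acc := PySem.Int.bxor p.2 m
      (p.1 ++ [acc], acc)) ([], 0)).1
  pvBytesHexUpper out

-- ===== PRECONDITION & SPEC =====
-- Pre_ holds exactly where Python A returns: empty key with non-empty text raises
-- ZeroDivisionError, and a key byte actually used (the first min(len(text), len(key)) of
-- them) outside 0..255 forces an out-of-range list element, so bytes() raises ValueError.
def Pre_rolling_xor_encrypt (text : String) (key_bytes : List Int) : Prop :=
  (text.toList ≠ [] → key_bytes ≠ []) ∧
  ∀ k ∈ key_bytes.take text.toList.length, 0 ≤ k ∧ k < 256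
instance (text : String) (key_bytes : List Int) : Decidable (Pre_rolling_xor_encrypt text key_bytes) := by
  unfold Pre_rolling_xor_encrypt; infer_instance

def pvWitness_rolling_xor_encrypt : String × List Int := ("Hi", [1, 2])

def Spec_rolling_xor_encrypt (text : String) (key_bytes : List Int) (out : String) : Prop := out = rolling_xor_encrypt_alt text key_bytes
instance (text : String) (key_bytes : List Int) (out : String) : Decidable (Spec_rolling_xor_encrypt text key_bytes out) := by unfold Spec_rolling_xor_encrypt; infer_instance

-- ===== CLAIM (what is proved, stated in full; the proofs are below) =====
def Claim_equal_rolling_xor_encrypt : Prop := ∀ (text : String) (key_bytes : List Int), Dom_rolling_xor_encrypt text key_bytes → Pre_rolling_xor_encrypt text key_bytes → Spec_rolling_xor_encrypt text key_bytes (rolling_xor_encrypt text key_bytes)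

-- ===== LEMMAS AND PROOFS =====

-- prefix-XOR scan specification
def pvPfx (a : Int) : List Int → List Int
  | [] => []
  | m :: ms => (PySem.Int.bxor a m) :: pvPfx (PySem.Int.bxor a m) ms

theorem pvPfx_append_singleton (a x : Int) (l : List Int) :
    pvPfx a (l ++ [x]) = pvPfx a l ++ [PySem.Int.bxor (l.foldl PySem.Int.bxor a) x] := by
  induction l generalizing a with
  | nil => simp [pvPfx]
  | cons m ms ih => simp [pvPfx, ih]

theorem pvPfx_getD_last (a : Int) (l : List Int) (h : l ≠ []) :
    (pvPfx a l).getD (l.length - 1) 0 = l.foldl PySem.Int.bxor a := by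
  induction l generalizing a with
  | nil => exact absurd rfl h
  | cons m ms ih =>
    cases ms with
    | nil => simp [pvPfx]
    | cons m' ms' =>
      have := ih (a := PySem.Int.bxor a m) (by simp)
      simpa [pvPfx, List.foldl] using this

-- B's fold builds the prefix-XOR scan
theorem pvAltFold (l : List Int) (out : List Int) (a : Int) :
    (l.foldl (fun (p : List Int × Int) m =>
      let acc := PySem.Int.bxor p.2 m
      (p.1 ++ [acc], acc)) (out, a)) = (out ++ pvPfx a l, l.foldl PySem.Int.bxor a) := by
  induction l generalizing out a with
  | nil => simp [pvPfx]
  | cons m ms ih => simp [pvPfx, ih, List.foldl]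

-- B's masked list as a range map
theorem pvMasked_eq (data key_bytes : List Int) (klen : Nat) :
    ((PySem.List.enumerate data).map
        (fun p => PySem.Int.bxor p.2 (key_bytes.getD (p.1.toNat % klen) 0))) =
      (List.range data.length).map
        (fun i => PySem.Int.bxor (data.getD i 0) (key_bytes.getD (i % klen) 0)) := by
  apply List.ext_getElem
  · simp [PySem.List.length_enumerate]
  · intro i h1 h2
    simp only [List.getElem_map, PySem.List.getElem_enumerate, List.getElem_range]
    have hi : i < data.length := by
      simpa [PySem.List.length_enumerate] using h1
    simp [List.getD_eq_getElem?_getD, List.getElem?_eq_getElem hi]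

-- A's loop builds the prefix-XOR scan of the masked stream
theorem pvAFold (data key_bytes : List Int) (klen : Nat) (n : Nat) :
    ((List.range n).foldl (fun (encrypted : List Int) i =>
      let encrypted_byte := PySem.Int.bxor (data.getD i 0) (key_bytes.getD (i % klen) 0)
      let encrypted_byte := if 0 < i then PySem.Int.bxor encrypted_byte (encrypted.getD (i - 1) 0) else encrypted_byte
      encrypted ++ [encrypted_byte]) []) =
    pvPfx 0 ((List.range n).map
        (fun i => PySem.Int.bxor (data.getD i 0) (key_bytes.getD (i % klen) 0))) := by
  induction n with
  | zero => simp [pvPfx]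
  | succ n ih =>
    rw [List.range_succ, List.foldl_append, List.map_append]
    simp only [List.map_cons, List.map_nil, List.foldl_cons, List.foldl_nil]
    rw [pvPfx_append_singleton, ih]
    by_cases hn : 0 < n
    · have hne : (List.range n).map
          (fun i => PySem.Int.bxor (data.getD i 0) (key_bytes.getD (i % klen) 0)) ≠ [] := by
        simp [List.map_eq_nil_iff, List.range_eq_nil]; omega
      have hlast := pvPfx_getD_last 0 ((List.range n).map
          (fun i => PySem.Int.bxor (data.getD i 0) (key_bytes.getD (i % klen) 0))) hne
      simp only [List.length_map, List.length_range] at hlast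
      simp only [hn, if_pos, hlast]
      rw [PySem.Int.bxor_comm]
    · have hn0 : n = 0 := by omega
      subst hn0
      simp [PySem.Int.bxor_comm 0, PySem.Int.bxor_zero]

-- ===== VERDICT (by name: the statement is the Claim_ definition above) =====
theorem rolling_xor_encrypt_spec : Claim_equal_rolling_xor_encrypt := by
  intro text key_bytes _ _
  unfold Spec_rolling_xor_encrypt rolling_xor_encrypt rolling_xor_encrypt_alt
  simp only [pvMasked_eq, pvAltFold, pvAFold]
  simp
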